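-- pv_equiv track=rewrite | github.com/legend048/python-shell | app/main.py | tokenize_with_redirs
-- ===== SOURCE A (Python) =====
-- def tokenize_with_redirs(line: str) -> list[str]:
--     tokens = []
--     buf = []
--     i = 0
--     in_single = False
--     in_double = False
--     escape = False
--
--     def flush_buf():
--         if buf:
--             tokens.append("".join(buf))
--             buf.clear()
--
--     while i < len(line):
--         c = line[i]
--
--         if escape:
--             buf.append(c)
--             escape = False
--             i += 1
--             continue
--
--         if not in_single and not in_double and c == "\\":
--             escape = True
--             i += 1
--             continue
--
--         if in_single:
--             if c == "'":
--                 in_single = False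
--             else:
--                 buf.append(c)
--             i += 1
--             continue
--
--         if in_double:
--             if c == '"':
--                 in_double = False
--                 i += 1
--                 continue
--
--             if c == "\\":
--                 if i + 1 < len(line):
--                     nxt = line[i + 1]
--                     if nxt in ['\\', '"', '$', '`', '\n']:
--                         buf.append(nxt)
--                         i += 2
--                         continue
--                 buf.append("\\")
--                 i += 1
--                 continue
--
--             buf.append(c)
--             i += 1
--             continue
--
--         if c.isspace():
--             flush_buf()
--             i += 1
--             continue
--
--         if c == "'":
--             in_single = True
--             i += 1
--             continue
--
--         if c == '"':
--             in_double = True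
--             i += 1
--             continue
--
--         if c == ">":
--             fd_prefix = "".join(buf) if buf and all(ch.isdigit() for ch in buf) else None
--             if fd_prefix is None:
--                 flush_buf()
--             else:
--                 buf.clear()
--
--             if i + 1 < len(line) and line[i + 1] == ">":
--                 op = ">>"
--                 i += 2
--             else:
--                 op = ">"
--                 i += 1
--
--             tokens.append((fd_prefix + op) if fd_prefix is not None else op)
--             continue
--
--         buf.append(c)
--         i += 1
--
--     if in_single or in_double:
--         raise ValueError("unclosed quote")
--
--     if escape:
--         buf.append("\\")
--
--     flush_buf()
--     return tokens
-- ===== SOURCE B (Python) =====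
-- def tokenize_with_redirs(line: str) -> list[str]:
--     # Quoted-run scanner: dispatch on the current char and consume whole
--     # quoted runs with inner loops, instead of per-char mode flags.
--     tokens = []
--     buf = ""
--     n = len(line)
--     i = 0
--     while i < n:
--         c = line[i]
--         if c == "'":
--             j = line.find("'", i + 1)
--             if j == -1:
--                 raise ValueError("unclosed quote")
--             buf += line[i + 1:j]
--             i = j + 1
--         elif c == '"':
--             i += 1
--             while True:
--                 if i >= n:
--                     raise ValueError("unclosed quote")
--                 c = line[i]
--                 if c == '"':
--                     i += 1
--                     break
--                 if c == "\\" and i + 1 < n and line[i + 1] in '\\"$`\n':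
--                     buf += line[i + 1]
--                     i += 2
--                 else:
--                     buf += c
--                     i += 1
--         elif c == "\\":
--             if i + 1 < n:
--                 buf += line[i + 1]
--                 i += 2
--             else:
--                 buf += "\\"
--                 i += 1
--         elif c.isspace():
--             if buf:
--                 tokens.append(buf)
--                 buf = ""
--             i += 1
--         elif c == ">":
--             digits = buf != "" and buf.isdigit()
--             if not digits and buf:
--                 tokens.append(buf)
--             buf_prefix = buf if digits else ""
--             buf = ""
--             if i + 1 < n and line[i + 1] == ">":
--                 op = ">>"
--                 i += 2
--             else:
--                 op = ">"
--                 i += 1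
--             tokens.append(buf_prefix + op)
--         else:
--             buf += c
--             i += 1
--     if buf:
--         tokens.append(buf)
--     return tokens
-- ===== Notes on version B (the rewrite author's own statement) =====
-- stated objective: alternative
-- what changed: Replaced A's per-character flag state machine (in_single/in_double/escape booleans threaded through one loop) with a main dispatch loop that consumes whole quoted runs via inner scanners (find-the-closing-quote for single quotes, a dedicated escape-aware inner loop for double quotes) and handles backslash by direct lookahead instead of a pending-escape flag.
import Mathlib
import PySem

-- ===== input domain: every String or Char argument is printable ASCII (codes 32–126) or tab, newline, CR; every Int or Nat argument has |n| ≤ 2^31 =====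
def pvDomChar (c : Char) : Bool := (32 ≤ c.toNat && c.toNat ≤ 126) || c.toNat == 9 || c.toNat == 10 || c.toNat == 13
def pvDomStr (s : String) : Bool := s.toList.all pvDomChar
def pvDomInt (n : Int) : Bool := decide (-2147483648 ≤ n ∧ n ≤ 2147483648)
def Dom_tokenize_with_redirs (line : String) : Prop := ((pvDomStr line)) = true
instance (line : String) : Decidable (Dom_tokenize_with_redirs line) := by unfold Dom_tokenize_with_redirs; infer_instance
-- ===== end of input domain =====

-- B replaces A's per-character flag state machine (in_single/in_double/escape) by a dispatch
-- loop that consumes whole quoted runs with inner scanners; same O(n), different decomposition.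
-- On unclosed quotes both Pythons raise ValueError (excluded by Pre_; ports return [] there).

-- ===== PORT A =====
-- A's while-loop over i, ported as recursion over the remaining characters with
-- the same tokens/buf/in_single/in_double/escape state; the i+2 jumps become
-- two-element patterns; the final 'raise ValueError' paths return [].
def tokA (rest : List Char) (tokens : List String) (buf : List Char)
    (in_single in_double escape : Bool) : List String :=
  match rest with
  | [] =>
    if in_single || in_double then []  -- raise ValueError("unclosed quote")
    else
      let buf := if escape then buf ++ ['\\'] else buf
      if buf ≠ [] then tokens ++ [String.ofList buf] else tokens
  | c :: rest =>
    if escape then tokA rest tokens (buf ++ [c]) in_single in_double false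
    else if !in_single && !in_double && c == '\\' then
      tokA rest tokens buf in_single in_double true
    else if in_single then
      if c == '\'' then tokA rest tokens buf false in_double escape
      else tokA rest tokens (buf ++ [c]) in_single in_double escape
    else if in_double then
      if c == '"' then tokA rest tokens buf in_single false escape
      else if c == '\\' then
        match rest with
        | nxt :: rest' =>
          if nxt == '\\' || nxt == '"' || nxt == '$' || nxt == '`' || nxt == '\n' then
            tokA rest' tokens (buf ++ [nxt]) in_single in_double escape
          else tokA (nxt :: rest') tokens (buf ++ ['\\']) in_single in_double escape
        | [] => tokA [] tokens (buf ++ ['\\']) in_single in_double escape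
      else tokA rest tokens (buf ++ [c]) in_single in_double escape
    else if PySem.Chars.isspace c then
      tokA rest (if buf ≠ [] then tokens ++ [String.ofList buf] else tokens) [] in_single in_double escape
    else if c == '\'' then tokA rest tokens buf true in_double escape
    else if c == '"' then tokA rest tokens buf in_single true escape
    else if c == '>' then
      let fdDigits := buf ≠ [] ∧ buf.all PySem.Chars.isdigit
      let tokens := if ¬ fdDigits ∧ buf ≠ [] then tokens ++ [String.ofList buf] else tokens
      let pre := if fdDigits then buf else []
      match rest with
      | nxt :: rest' =>
        if nxt == '>' then tokA rest' (tokens ++ [String.ofList (pre ++ ['>', '>'])]) [] in_single in_double escape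
        else tokA (nxt :: rest') (tokens ++ [String.ofList (pre ++ ['>'])]) [] in_single in_double escape
      | [] => tokA [] (tokens ++ [String.ofList (pre ++ ['>'])]) [] in_single in_double escape
    else tokA rest tokens (buf ++ [c]) in_single in_double escape
termination_by rest.length
decreasing_by all_goals (simp; try omega)

def tokenize_with_redirs (line : String) : List String :=
  tokA line.toList [] [] false false false

-- ===== PORT B =====
-- Source B's `line.find("'", i + 1)` plus slice, on the remaining characters:
-- content up to the first quote, rest after it; none = no closing quote (ValueError).
def scanSingle (rest : List Char) : Option (List Char × List Char) :=
  match rest.dropWhile (· != '\'') with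
  | _ :: r => some (rest.takeWhile (· != '\''), r)
  | [] => none

-- Source B's inner double-quote loop; none = reached end of line (ValueError).
def scanDouble (rest : List Char) (buf : List Char) : Option (List Char × List Char) :=
  match rest with
  | [] => none
  | c :: rest =>
    if c == '"' then some (buf, rest)
    else
      match rest with
      | d :: rest' =>
        if c == '\\' && (d == '\\' || d == '"' || d == '$' || d == '`' || d == '\n') then
          scanDouble rest' (buf ++ [d])
        else scanDouble (d :: rest') (buf ++ [c])
      | [] => scanDouble [] (buf ++ [c])
termination_by rest.length
decreasing_by all_goals (simp; try omega)

-- Source B's main dispatch loop over i, as recursion over the remaining characters.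
-- `fuel` is only a structural totality guard (each iteration consumes ≥ 1 character,
-- so the top-level call with fuel = line length never runs out).
def tokB (fuel : Nat) (rest : List Char) (tokens : List String) (buf : List Char) : List String :=
  match fuel, rest with
  | _, [] => if buf ≠ [] then tokens ++ [String.ofList buf] else tokens
  | 0, _ :: _ => []  -- fuel guard, unreachable from tokenize_with_redirs_alt
  | fuel + 1, c :: rest =>
    if c == '\'' then
      match scanSingle rest with
      | none => []  -- raise ValueError("unclosed quote")
      | some (content, rest') => tokB fuel rest' tokens (buf ++ content)
    else if c == '"' then
      match scanDouble rest buf with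
      | none => []  -- raise ValueError("unclosed quote")
      | some (buf', rest') => tokB fuel rest' tokens buf'
    else if c == '\\' then
      match rest with
      | d :: rest' => tokB fuel rest' tokens (buf ++ [d])
      | [] => tokB fuel [] tokens (buf ++ ['\\'])
    else if PySem.Chars.isspace c then
      tokB fuel rest (if buf ≠ [] then tokens ++ [String.ofList buf] else tokens) []
    else if c == '>' then
      let digits := buf ≠ [] ∧ buf.all PySem.Chars.isdigit
      let tokens := if ¬ digits ∧ buf ≠ [] then tokens ++ [String.ofList buf] else tokens
      let pre := if digits then buf else []
      match rest with
      | d :: rest' =>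
        if d == '>' then tokB fuel rest' (tokens ++ [String.ofList (pre ++ ['>', '>'])]) []
        else tokB fuel (d :: rest') (tokens ++ [String.ofList (pre ++ ['>'])]) []
      | [] => tokB fuel [] (tokens ++ [String.ofList (pre ++ ['>'])]) []
    else tokB fuel rest tokens (buf ++ [c])

def tokenize_with_redirs_alt (line : String) : List String :=
  tokB line.toList.length line.toList [] []

-- ===== PRECONDITION & SPEC =====
-- Pre_ = "every quote opened outside an escape is closed": exactly the inputs on which the
-- Python A returns instead of raising ValueError("unclosed quote"). It excludes nothing
-- on which A returns. qOut/qSingle/qDouble track only the quote mode, nothing else.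
mutual
def qOut : List Char → Bool
  | [] => true
  | '\\' :: [] => true
  | '\\' :: _ :: rest => qOut rest
  | '\'' :: rest => qSingle rest
  | '"' :: rest => qDouble rest
  | _ :: rest => qOut rest
def qSingle : List Char → Bool
  | [] => false
  | '\'' :: rest => qOut rest
  | _ :: rest => qSingle rest
def qDouble : List Char → Bool
  | [] => false
  | '"' :: rest => qOut rest
  | '\\' :: [] => false
  | '\\' :: _ :: rest => qDouble rest   -- an unescapable next char is never '"' or '\', so both branches of A consume it
  | _ :: rest => qDouble rest
end

def Pre_tokenize_with_redirs (line : String) : Prop := qOut line.toList = true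
instance (line : String) : Decidable (Pre_tokenize_with_redirs line) := by
  unfold Pre_tokenize_with_redirs; infer_instance

def pvWitness_tokenize_with_redirs : String := "echo 'a b' 2>>\"x\\$y\" out"

def Spec_tokenize_with_redirs (line : String) (out : List String) : Prop :=
  out = tokenize_with_redirs_alt line
instance (line : String) (out : List String) : Decidable (Spec_tokenize_with_redirs line out) := by
  unfold Spec_tokenize_with_redirs; infer_instance

-- ===== CLAIM (what is proved, stated in full; the proofs are below) =====
def Claim_equal_tokenize_with_redirs : Prop := ∀ (line : String), Dom_tokenize_with_redirs line → Pre_tokenize_with_redirs line → Spec_tokenize_with_redirs line (tokenize_with_redirs line)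

-- ===== LEMMAS AND PROOFS =====

theorem scanSingle_shrinks (rest : List Char) : ∀ content rest',
    scanSingle rest = some (content, rest') → rest'.length < rest.length := by
  intro content rest' h
  unfold scanSingle at h
  have hd : (rest.dropWhile (· != '\'')).length ≤ rest.length := List.length_dropWhile_le _ _
  cases hdw : rest.dropWhile (· != '\'') with
  | nil => rw [hdw] at h; exact absurd h (by simp)
  | cons x r =>
    rw [hdw] at h
    simp only [Option.some.injEq, Prod.mk.injEq] at h
    obtain ⟨h1, h2⟩ := h
    subst h2
    rw [hdw] at hd; simp at hd; omega

theorem scanDouble_shrinks (n : Nat) : ∀ (rest : List Char), rest.length ≤ n → ∀ buf buf' rest',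
    scanDouble rest buf = some (buf', rest') → rest'.length < rest.length := by
  induction n with
  | zero =>
    intro rest h buf buf' rest' hs
    have : rest = [] := List.length_eq_zero_iff.mp (Nat.le_zero.mp h)
    subst this; rw [scanDouble.eq_def] at hs; exact absurd hs (by simp)
  | succ n ih =>
    intro rest h buf buf' rest' hs
    cases rest with
    | nil => rw [scanDouble.eq_def] at hs; exact absurd hs (by simp)
    | cons c rest =>
      rw [scanDouble.eq_def] at hs
      by_cases hc : (c == '"') = true
      · simp [hc] at hs
        obtain ⟨_, h2⟩ := hs; subst h2; simp
      · simp only [hc, Bool.false_eq_true, if_false] at hs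
        cases rest with
        | nil =>
          rw [scanDouble.eq_def] at hs; exact absurd hs (by simp)
        | cons d rest' =>
          simp at h
          by_cases hesc : (c == '\\' && (d == '\\' || d == '"' || d == '$' || d == '`' || d == '\n')) = true
          · simp only [hesc, if_pos] at hs
            have := ih rest' (by omega) _ _ _ hs
            simp; omega
          · simp only [hesc, Bool.false_eq_true, if_false] at hs
            have := ih (d :: rest') (by simp; omega) _ _ _ hs
            simp at this ⊢; omega

theorem scanSingle_cons_ne {c : Char} (hc : ¬ c = '\'') (rest : List Char) :
    scanSingle (c :: rest) =
      (match scanSingle rest with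
       | some (content, r) => some (c :: content, r)
       | none => none) := by
  have hne : (c != '\'') = true := by simp [hc]
  unfold scanSingle
  simp only [List.dropWhile, List.takeWhile, hne]
  cases hdw : rest.dropWhile (· != '\'') <;> simp

theorem tokA_single (rest : List Char) : ∀ tokens buf,
    tokA rest tokens buf true false false =
      match scanSingle rest with
      | some (content, rest') => tokA rest' tokens (buf ++ content) false false false
      | none => [] := by
  induction rest with
  | nil => intro tokens buf; rw [tokA.eq_def]; simp [scanSingle]
  | cons c rest ih =>
    intro tokens buf
    rw [tokA.eq_def]
    by_cases hc : c = '\''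
    · subst hc; simp [scanSingle, List.dropWhile, List.takeWhile]
    · have hbe : (c == '\'') = false := by simp [hc]
      simp only [Bool.not_true, Bool.false_and, Bool.false_eq_true, if_false,
        ite_false, ite_true, hbe, scanSingle_cons_ne hc]
      rw [ih]
      cases hss : scanSingle rest with
      | none => simp
      | some p => cases p with | mk content r => simp [List.append_assoc]

theorem tokA_double (n : Nat) : ∀ (rest : List Char), rest.length ≤ n → ∀ tokens buf,
    tokA rest tokens buf false true false =
      match scanDouble rest buf with
      | some (buf', rest') => tokA rest' tokens buf' false false false
      | none => [] := by
  induction n with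
  | zero =>
    intro rest h tokens buf
    have : rest = [] := List.length_eq_zero_iff.mp (Nat.le_zero.mp h)
    subst this
    rw [tokA.eq_def, scanDouble.eq_def]; simp
  | succ n ih =>
    intro rest h tokens buf
    cases rest with
    | nil => rw [tokA.eq_def, scanDouble.eq_def]; simp
    | cons c rest =>
      simp only [List.length_cons, Nat.add_le_add_iff_right] at h
      rw [tokA.eq_def, scanDouble.eq_def]
      by_cases hq : c = '"'
      · subst hq; simp
      · have hqb : (c == '"') = false := by simp [hq]
        by_cases hb : c = '\\'
        · subst hb
          simp only [hqb, Bool.false_eq_true, if_false, ite_false, Bool.not_false,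
            Bool.true_and, Bool.and_false, Bool.false_and, ite_true, if_true,
            show (('\\' : Char) == '"') = false by decide,
            show (('\\' : Char) == '\\') = true by decide, Bool.not_true]
          cases rest with
          | nil =>
            rw [tokA.eq_def, scanDouble.eq_def]; simp
          | cons d rest' =>
            by_cases hd : (d == '\\' || d == '"' || d == '$' || d == '`' || d == '\n') = true
            · simp only [hd, if_true, ite_true]
              exact ih rest' (by simp at h ⊢; omega) tokens (buf ++ [d])
            · simp only [hd, if_false, Bool.false_eq_true, ite_false]
              exact ih (d :: rest') (by simp at h ⊢; omega) tokens (buf ++ ['\\'])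
        · have hbb : (c == '\\') = false := by simp [hb]
          simp only [hqb, hbb, Bool.false_eq_true, if_false, ite_false, Bool.not_false,
            Bool.true_and, Bool.and_false, Bool.false_and, Bool.not_true, ite_true, if_true]
          rw [ih rest h tokens (buf ++ [c])]
          cases rest with
          | nil => simp [scanDouble.eq_def]
          | cons d rest' => simp [hbb]

theorem tokA_eq_tokB (n : Nat) : ∀ (rest : List Char), rest.length ≤ n → ∀ tokens buf,
    tokA rest tokens buf false false false = tokB n rest tokens buf := by
  induction n with
  | zero =>
    intro rest h tokens buf
    have : rest = [] := List.length_eq_zero_iff.mp (Nat.le_zero.mp h)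
    subst this; rw [tokA.eq_def, tokB.eq_def]; simp
  | succ n ih =>
    intro rest h tokens buf
    cases rest with
    | nil => rw [tokA.eq_def, tokB.eq_def]; simp
    | cons c rest =>
      simp only [List.length_cons, Nat.add_le_add_iff_right] at h
      rw [tokA.eq_def, tokB.eq_def]
      by_cases h1 : c = '\''
      · subst h1
        simp only [show PySem.Chars.isspace '\'' = false by decide,
          show (('\'' : Char) == '\\') = false by decide,
          show (('\'' : Char) == '\'') = true by decide,
          Bool.not_false, Bool.and_false, Bool.false_and, Bool.true_and, Bool.and_true,
          Bool.false_eq_true, if_false, ite_false, if_true, ite_true]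
        rw [tokA_single]
        cases hss : scanSingle rest with
        | none => simp
        | some p =>
          cases p with
          | mk content r =>
            have hlt := scanSingle_shrinks rest _ _ hss
            exact ih r (by omega) tokens (buf ++ content)
      · by_cases h2 : c = '"'
        · subst h2
          simp only [show PySem.Chars.isspace '"' = false by decide,
            show (('"' : Char) == '\\') = false by decide,
            show (('"' : Char) == '\'') = false by decide,
            show (('"' : Char) == '"') = true by decide,
            Bool.not_false, Bool.and_false, Bool.false_and, Bool.true_and, Bool.and_true,
            Bool.false_eq_true, if_false, ite_false, if_true, ite_true]
          rw [tokA_double rest.length rest (le_refl _)]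
          cases hsd : scanDouble rest buf with
          | none => simp
          | some p =>
            cases p with
            | mk buf' r =>
              have hlt := scanDouble_shrinks rest.length rest (le_refl _) _ _ _ hsd
              exact ih r (by omega) tokens buf'
        · by_cases h3 : c = '\\'
          · subst h3
            simp only [show (('\\' : Char) == '\\') = true by decide,
              show (('\\' : Char) == '\'') = false by decide,
              show (('\\' : Char) == '"') = false by decide,
              Bool.not_false, Bool.and_false, Bool.false_and, Bool.true_and, Bool.and_true,
              Bool.false_eq_true, if_false, ite_false, if_true, ite_true]
            cases rest with
            | nil => rw [tokA.eq_def, tokB.eq_def]; simp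
            | cons d rest' =>
              rw [tokA.eq_def]
              simp only [if_true, ite_true]
              exact ih rest' (by simp at h; omega) tokens (buf ++ [d])
          · have e1 : (c == '\'') = false := by simp [h1]
            have e2 : (c == '"') = false := by simp [h2]
            have e3 : (c == '\\') = false := by simp [h3]
            by_cases h4 : PySem.Chars.isspace c = true
            · simp only [e1, e2, e3, h4, Bool.not_false, Bool.and_false, Bool.false_and,
                Bool.true_and, Bool.and_true, Bool.false_eq_true, if_false, ite_false,
                if_true, ite_true]
              exact ih rest h _ []
            · have h4' : PySem.Chars.isspace c = false := by simpa using h4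
              by_cases h5 : c = '>'
              · subst h5
                simp only [e1, e2, e3, h4', Bool.not_false, Bool.and_false, Bool.false_and,
                  Bool.true_and, Bool.and_true, Bool.false_eq_true, if_false, ite_false,
                  show (('>' : Char) == '>') = true by decide, if_true, ite_true]
                cases rest with
                | nil => rw [tokA.eq_def, tokB.eq_def]; simp
                | cons d rest' =>
                  by_cases hd : d = '>'
                  · subst hd
                    simp only [show (('>' : Char) == '>') = true by decide, if_true, ite_true]
                    exact ih rest' (by simp at h; omega) _ []
                  · have ed : (d == '>') = false := by simp [hd]
                    simp only [ed, Bool.false_eq_true, if_false, ite_false]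
                    exact ih (d :: rest') h _ []
              · have e5 : (c == '>') = false := by simp [h5]
                simp only [e1, e2, e3, e5, h4', Bool.not_false, Bool.and_false, Bool.false_and,
                  Bool.true_and, Bool.and_true, Bool.false_eq_true, if_false, ite_false,
                  if_true, ite_true]
                exact ih rest h tokens (buf ++ [c])

-- ===== VERDICT (by name: the statement is the Claim_ definition above) =====
theorem tokenize_with_redirs_spec : Claim_equal_tokenize_with_redirs := by
  intro line _ _
  unfold Spec_tokenize_with_redirs tokenize_with_redirs tokenize_with_redirs_alt
  exact tokA_eq_tokB line.toList.length line.toList (le_refl _) [] []
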